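-- pv_equiv track=rewrite | github.com/krzysztof-turowski/programming-contests | facebook-hacker-cup/2012-qualification-round/billboards.py | solve
-- ===== SOURCE A (Python) =====
-- def fit(S, F, W, H):
--     if F * max(len(s) for s in S) > W:
--         return False
--     w, h = -F, F
--     for s in S:
--         if w + (len(s) + 1) * F <= W:
--             w += (len(s) + 1) * F
--         else:
--             w, h = len(s) * F, h + F
--     return h <= H
--
-- def solve(S, W, H):
--     low, high = 0, H + 1
--     while low + 1 < high:
--         mid = (low + high) // 2
--         if fit(S, mid, W, H):
--             low = mid
--         else:
--             high = mid
--     return low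
-- ===== SOURCE B (Python) =====
-- def count_lines(lens, C):
--     # greedy word wrap by character capacity C: number of lines used
--     lines, cur = 1, lens[0]
--     for x in lens[1:]:
--         if cur + 1 + x <= C:
--             cur += 1 + x
--         else:
--             lines += 1
--             cur = x
--     return lines
--
--
-- def solve(S, W, H):
--     # Capacity-block enumeration: a font F is feasible iff F*maxlen <= W and
--     # lines(W//F)*F <= H, and lines depends on F only through C = W//F.  Walk
--     # the O(sqrt(W)) blocks of constant C from the largest plausible font down,
--     # computing the greedy line count once per block; the first block containing
--     # its own candidate min(F, H//lines) yields the maximal feasible font.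
--     if H <= 0 or W < 0:
--         return 0
--     lens = [len(s) for s in S]
--     maxlen = max(lens, default=0)
--     F = min(H, W // maxlen) if maxlen > 0 else H
--     while F >= 1:
--         C = W // F
--         L = count_lines(lens, C)
--         cand = min(F, H // L)
--         if cand > W // (C + 1):
--             return cand
--         F = W // (C + 1)
--     return 0
-- ===== Notes on version B (the rewrite author's own statement) =====
-- stated objective: alternative
-- what changed: Removes the search over font sizes entirely: B never calls fit and has no binary search; it enumerates the distinct character capacities C = W//F block by block (feasibility of F depends on F only through C and the greedy line count at C), computes the greedy line count once per capacity with a fresh count_lines helper, and returns the first block's candidate min(F, H//lines).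
import Mathlib
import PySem

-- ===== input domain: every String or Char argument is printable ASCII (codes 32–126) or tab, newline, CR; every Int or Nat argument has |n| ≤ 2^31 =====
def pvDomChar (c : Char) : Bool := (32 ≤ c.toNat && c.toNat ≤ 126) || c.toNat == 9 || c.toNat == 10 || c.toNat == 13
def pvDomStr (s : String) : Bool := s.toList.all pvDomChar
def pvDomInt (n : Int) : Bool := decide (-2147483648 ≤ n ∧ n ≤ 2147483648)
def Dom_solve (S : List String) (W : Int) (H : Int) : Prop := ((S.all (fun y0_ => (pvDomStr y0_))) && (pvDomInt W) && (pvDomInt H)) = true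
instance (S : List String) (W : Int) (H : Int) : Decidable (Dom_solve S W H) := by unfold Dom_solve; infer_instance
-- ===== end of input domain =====

-- B drops the search over font sizes altogether: it enumerates the distinct character
-- capacities C = W//F block by block, computing the greedy line count once per capacity,
-- and never calls `fit`; A's `fit` helper is ported below only as part of A.

-- ===== PORT A =====
-- A's feasibility helper. On S = [] Python's max(...) raises ValueError; that input is
-- excluded by Pre_solve (for H ≥ 1), here the match returns false.
def fit (S : List String) (F : Int) (W : Int) (H : Int) : Bool :=
  match PySem.List.max? (S.map PySem.Str.len) (fun x => x) with
  | none => false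
  | some m =>
    if F * m > W then false
    else
      let st := S.foldl (fun (p : Int × Int) s =>
        if p.1 + (PySem.Str.len s + 1) * F ≤ W then (p.1 + (PySem.Str.len s + 1) * F, p.2)
        else (PySem.Str.len s * F, p.2 + F)) (-F, F)
      decide (st.2 ≤ H)

-- termination helper for the midpoint (cited by `decreasing_by`)
theorem pvMidBounds (low high : Int) (h : low + 1 < high) :
    low < PySem.Int.floordiv (low + high) 2 ∧ PySem.Int.floordiv (low + high) 2 < high := by
  have hb := PySem.Int.floordiv_two_mid_bounds (lo := low + 1) (hi := high - 1) (by omega)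
  have he : low + 1 + (high - 1) = low + high := by ring
  rw [he] at hb
  omega

def solveLoop (S : List String) (W : Int) (H : Int) (low : Int) (high : Int) : Int :=
  if h : low + 1 < high then
    let mid := PySem.Int.floordiv (low + high) 2
    if fit S mid W H then solveLoop S W H mid high else solveLoop S W H low mid
  else low
termination_by (high - low).toNat
decreasing_by
  · have := pvMidBounds low high h; omega
  · have := pvMidBounds low high h; omega

def solve (S : List String) (W : Int) (H : Int) : Int :=
  solveLoop S W H 0 (H + 1)

-- ===== PORT B =====
-- the body of count_lines' for-loop (state = (lines, cur))
def countStep (C : Int) (p : Int × Int) (y : Int) : Int × Int :=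
  if p.2 + 1 + y ≤ C then (p.1, p.2 + 1 + y) else (p.1 + 1, y)

-- `count_lines(lens, C)`; Python indexes lens[0], which raises on [] — reached only
-- outside Pre_solve (S = [] with H ≥ 1); the [] branch here returns 1.
def countLines (lens : List Int) (C : Int) : Int :=
  match lens with
  | [] => 1
  | x :: xs => (xs.foldl (countStep C) (1, x)).1

-- the `while F >= 1` block loop; fuel = F.toNat at the call makes the recursion
-- structural (F strictly decreases whenever W ≥ 0, so the fuel is never exhausted first)
def blockLoop (lens : List Int) (W : Int) (H : Int) : Nat → Int → Int
  | 0, _ => 0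
  | fuel + 1, F =>
    if 1 ≤ F then
      let C := PySem.Int.floordiv W F
      let L := countLines lens C
      let cand := min F (PySem.Int.floordiv H L)
      if PySem.Int.floordiv W (C + 1) < cand then cand
      else blockLoop lens W H fuel (PySem.Int.floordiv W (C + 1))
    else 0

def solve_alt (S : List String) (W : Int) (H : Int) : Int :=
  if H ≤ 0 ∨ W < 0 then 0
  else
    let lens := S.map PySem.Str.len
    let maxlen := match PySem.List.max? lens (fun x => x) with | none => 0 | some m => m
    let F0 := if 0 < maxlen then min H (PySem.Int.floordiv W maxlen) else H
    blockLoop lens W H F0.toNat F0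

-- ===== PRECONDITION & SPEC =====
-- Pre_solve excludes only S = [] with H ≥ 1: there Python's A raises ValueError in
-- max() on the empty sequence; for H ≤ 0 fit is never called.
def Pre_solve (S : List String) (W : Int) (H : Int) : Prop := S ≠ [] ∨ H ≤ 0
instance (S : List String) (W : Int) (H : Int) : Decidable (Pre_solve S W H) := by unfold Pre_solve; infer_instance

def pvWitness_solve : List String × Int × Int := (["hacker", "cup"], 30, 10)

def Spec_solve (S : List String) (W : Int) (H : Int) (out : Int) : Prop := out = solve_alt S W H
instance (S : List String) (W : Int) (H : Int) (out : Int) : Decidable (Spec_solve S W H out) := by unfold Spec_solve; infer_instance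

-- ===== CLAIM (what is proved, stated in full; the proofs are below) =====
def Claim_equal_solve : Prop := ∀ (S : List String) (W : Int) (H : Int), Dom_solve S W H → Pre_solve S W H → Spec_solve S W H (solve S W H)

-- ===== LEMMAS AND PROOFS =====

-- the fit loop, read over word lengths with a fixed character capacity C per line
def charStep (C : Int) (p : Int × Int) (x : Int) : Int × Int :=
  if p.1 + x + 1 ≤ C then (p.1 + x + 1, p.2) else (x, p.2 + 1)

-- raw fit fold = character-count fold, scaled by F (for F > 0)
theorem foldCorresp (W F : Int) (hF : 0 < F) :
    ∀ (xs : List Int) (k l : Int),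
    xs.foldl (fun (p : Int × Int) x =>
        if p.1 + (x + 1) * F ≤ W then (p.1 + (x + 1) * F, p.2) else (x * F, p.2 + F)) (k * F, l * F)
      = ((xs.foldl (charStep (PySem.Int.floordiv W F)) (k, l)).1 * F,
         (xs.foldl (charStep (PySem.Int.floordiv W F)) (k, l)).2 * F) := by
  intro xs
  induction xs with
  | nil => intro k l; simp
  | cons x t ihx =>
    intro k l
    simp only [List.foldl_cons, charStep]
    have hcond : (k * F + (x + 1) * F ≤ W) ↔ (k + x + 1 ≤ PySem.Int.floordiv W F) := by
      rw [PySem.Int.le_floordiv_iff_mul_le hF, show (k + x + 1) * F = k * F + (x + 1) * F from by ring]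
    by_cases hc : k * F + (x + 1) * F ≤ W
    · rw [if_pos hc, if_pos (hcond.1 hc),
        show k * F + (x + 1) * F = (k + x + 1) * F from by ring, ihx (k + x + 1) l]
    · rw [if_neg hc, if_neg (fun h => hc (hcond.2 h)),
        show l * F + F = (l + 1) * F from by ring, ihx x (l + 1)]

theorem charLinesLB (C : Int) : ∀ (xs : List Int) (k l : Int), l ≤ (xs.foldl (charStep C) (k, l)).2 := by
  intro xs
  induction xs with
  | nil => intro k l; simp
  | cons x t ihx =>
    intro k l
    simp only [List.foldl_cons, charStep]
    by_cases hc : k + x + 1 ≤ C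
    · rw [if_pos hc]; exact ihx _ _
    · rw [if_neg hc]; exact le_trans (by omega) (ihx x (l + 1))

-- a larger capacity never uses more lines (state dominance invariant)
theorem charDom : ∀ (xs : List Int) (C1 C2 k1 l1 k2 l2 : Int), C2 ≤ C1 →
    (∀ x ∈ xs, 0 ≤ x ∧ x ≤ C2) → -1 ≤ k2 →
    (l1 < l2 ∨ (l1 = l2 ∧ k1 ≤ k2)) →
    ((xs.foldl (charStep C1) (k1, l1)).2 < (xs.foldl (charStep C2) (k2, l2)).2 ∨
     ((xs.foldl (charStep C1) (k1, l1)).2 = (xs.foldl (charStep C2) (k2, l2)).2 ∧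
      (xs.foldl (charStep C1) (k1, l1)).1 ≤ (xs.foldl (charStep C2) (k2, l2)).1)) := by
  intro xs
  induction xs with
  | nil => intro C1 C2 k1 l1 k2 l2 _ _ _ hR; simpa using hR
  | cons x t ihx =>
    intro C1 C2 k1 l1 k2 l2 hC hall hk2 hR
    obtain ⟨hx0, hxC⟩ := hall x (List.mem_cons_self)
    have hall' : ∀ y ∈ t, 0 ≤ y ∧ y ≤ C2 := fun y hy => hall y (List.mem_cons_of_mem _ hy)
    simp only [List.foldl_cons, charStep]
    by_cases h1 : k1 + x + 1 ≤ C1 <;> by_cases h2 : k2 + x + 1 ≤ C2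
    · rw [if_pos h1, if_pos h2]; exact ihx C1 C2 _ _ _ _ hC hall' (by omega) (by omega)
    · rw [if_pos h1, if_neg h2]; exact ihx C1 C2 _ _ _ _ hC hall' (by omega) (by omega)
    · rw [if_neg h1, if_pos h2]; exact ihx C1 C2 _ _ _ _ hC hall' (by omega) (by omega)
    · rw [if_neg h1, if_neg h2]; exact ihx C1 C2 _ _ _ _ hC hall' (by omega) (by omega)

-- the h component of the raw fit fold never goes below its start (F ≥ 0)
theorem rawLB (F W : Int) (hF : 0 ≤ F) : ∀ (S : List String) (w h : Int),
    h ≤ (S.foldl (fun (p : Int × Int) s =>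
        if p.1 + (PySem.Str.len s + 1) * F ≤ W then (p.1 + (PySem.Str.len s + 1) * F, p.2)
        else (PySem.Str.len s * F, p.2 + F)) (w, h)).2 := by
  intro S
  induction S with
  | nil => intro w h; simp
  | cons s t ihs =>
    intro w h
    simp only [List.foldl_cons]
    by_cases hc : w + (PySem.Str.len s + 1) * F ≤ W
    · rw [if_pos hc]; exact ihs _ _
    · rw [if_neg hc]; exact le_trans (by omega) (ihs (PySem.Str.len s * F) (h + F))

-- with font 0 and W ≥ 0 the raw fold never moves
theorem zeroFold (W : Int) (hW : 0 ≤ W) : ∀ (S : List String),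
    S.foldl (fun (p : Int × Int) s =>
        if p.1 + (PySem.Str.len s + 1) * 0 ≤ W then (p.1 + (PySem.Str.len s + 1) * 0, p.2)
        else (PySem.Str.len s * 0, p.2 + 0)) (0, 0) = (0, 0) := by
  intro S
  induction S with
  | nil => rfl
  | cons s t ihs =>
    simp only [List.foldl_cons]
    have h1 : ((0:Int), (0:Int)).1 + (PySem.Str.len s + 1) * 0 ≤ W := by simpa using hW
    rw [if_pos h1,
      show (((0:Int), (0:Int)).1 + (PySem.Str.len s + 1) * 0, ((0:Int), (0:Int)).2)
        = ((0:Int), (0:Int)) from by norm_num]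
    exact ihs

theorem strLenNonneg (s : String) : 0 ≤ PySem.Str.len s := by
  simp [PySem.Str.len_eq]

-- KEY LEMMA: feasibility is antitone in the font size
theorem fit_mono (S : List String) (W H F1 F2 : Int) (h0 : 0 ≤ F1) (h12 : F1 ≤ F2)
    (hf : fit S F2 W H = true) : fit S F1 W H = true := by
  unfold fit at hf ⊢
  rcases hmax : PySem.List.max? (S.map PySem.Str.len) (fun x => x) with _ | m
  · rw [hmax] at hf; simp at hf
  · rw [hmax] at hf
    dsimp only at hf ⊢
    by_cases hc2 : F2 * m > W
    · rw [if_pos hc2] at hf; cases hf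
    · rw [if_neg hc2] at hf
      simp only [decide_eq_true_eq] at hf
      have hm0 : 0 ≤ m := by
        obtain ⟨s, _, hsm⟩ := List.mem_map.1 (PySem.List.max?_mem hmax)
        rw [← hsm]; exact strLenNonneg s
      have hF2 : 0 ≤ F2 := le_trans h0 h12
      have hW0 : 0 ≤ W := le_trans (mul_nonneg hF2 hm0) (by omega)
      rcases eq_or_lt_of_le h0 with h1z | h1p
      · -- F1 = 0
        rw [← h1z]
        have hH0 : 0 ≤ H := by
          have := rawLB F2 W hF2 S (-F2) F2
          omega
        rw [if_neg (by omega)]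
        rw [show (-(0:Int), (0:Int)) = ((0:Int), (0:Int)) from by norm_num, zeroFold W hW0 S]
        simpa using hH0
      · -- 0 < F1 ≤ F2
        have hF2p : 0 < F2 := lt_of_lt_of_le h1p h12
        rw [if_neg (by nlinarith)]
        simp only [decide_eq_true_eq]
        have hmap : ∀ (F : Int), S.foldl (fun (p : Int × Int) s =>
            if p.1 + (PySem.Str.len s + 1) * F ≤ W then (p.1 + (PySem.Str.len s + 1) * F, p.2)
            else (PySem.Str.len s * F, p.2 + F)) (-F, F)
            = (S.map PySem.Str.len).foldl (fun (p : Int × Int) x =>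
            if p.1 + (x + 1) * F ≤ W then (p.1 + (x + 1) * F, p.2) else (x * F, p.2 + F)) (-F, F) := by
          intro F; rw [List.foldl_map]
        rw [hmap] at hf ⊢
        have hinit : ∀ (F : Int), (-F, F) = ((-1 : Int) * F, (1 : Int) * F) := by intro F; norm_num
        rw [hinit F1, foldCorresp W F1 h1p]
        rw [hinit F2, foldCorresp W F2 hF2p] at hf
        set C1 := PySem.Int.floordiv W F1 with hC1def
        set C2 := PySem.Int.floordiv W F2 with hC2def
        have hmC2 : m ≤ C2 := by
          rw [hC2def, PySem.Int.le_floordiv_iff_mul_le hF2p]; nlinarith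
        have hC2F2 : C2 * F2 ≤ W := (PySem.Int.le_floordiv_iff_mul_le hF2p).1 (le_refl C2)
        have hC20 : 0 ≤ C2 := le_trans hm0 hmC2
        have hC12 : C2 ≤ C1 := by
          rw [hC1def, PySem.Int.le_floordiv_iff_mul_le h1p]
          nlinarith
        have hall : ∀ x ∈ S.map PySem.Str.len, 0 ≤ x ∧ x ≤ C2 := by
          intro x hx
          obtain ⟨s, _, hsx⟩ := List.mem_map.1 hx
          refine ⟨by rw [← hsx]; exact strLenNonneg s, ?_⟩
          exact le_trans (PySem.List.max?_isMax hmax x hx) hmC2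
        have hdom := charDom (S.map PySem.Str.len) C1 C2 (-1) 1 (-1) 1 hC12 hall (by omega)
          (Or.inr ⟨rfl, le_refl _⟩)
        have hl1 : (1 : Int) ≤ ((S.map PySem.Str.len).foldl (charStep C2) (-1, 1)).2 :=
          charLinesLB C2 _ (-1) 1
        have hL12 : ((S.map PySem.Str.len).foldl (charStep C1) (-1, 1)).2
            ≤ ((S.map PySem.Str.len).foldl (charStep C2) (-1, 1)).2 := by
          rcases hdom with h | ⟨h, _⟩
          · omega
          · omega
        have ha : ((S.map PySem.Str.len).foldl (charStep C1) (-1, 1)).2 * F1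
            ≤ ((S.map PySem.Str.len).foldl (charStep C2) (-1, 1)).2 * F1 :=
          mul_le_mul_of_nonneg_right hL12 (le_of_lt h1p)
        have hb : ((S.map PySem.Str.len).foldl (charStep C2) (-1, 1)).2 * F1
            ≤ ((S.map PySem.Str.len).foldl (charStep C2) (-1, 1)).2 * F2 :=
          mul_le_mul_of_nonneg_left h12 (by omega)
        omega

-- characterization of A's bisection loop
theorem solveLoop_char (S : List String) (W H : Int) :
    ∀ (n : ℕ) (low high : Int), (high - low).toNat = n → 0 ≤ low → low < high → high ≤ H + 1 →
    (fit S low W H = true ∨ low = 0) → (fit S high W H = false ∨ high = H + 1) →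
    (fit S (solveLoop S W H low high) W H = true ∨ solveLoop S W H low high = 0) ∧
    0 ≤ solveLoop S W H low high ∧ solveLoop S W H low high ≤ H ∧
    (fit S (solveLoop S W H low high + 1) W H = false ∨ solveLoop S W H low high + 1 = H + 1) := by
  intro n
  induction n using Nat.strong_induction_on with
  | _ n ih =>
    intro low high hn h0 hlh hhH hP hQ
    rw [solveLoop]
    by_cases hc : low + 1 < high
    · rw [dif_pos hc]
      have hmb := pvMidBounds low high hc
      by_cases hfit : fit S (PySem.Int.floordiv (low + high) 2) W H = true
      · simp only [hfit, if_true]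
        exact ih (high - PySem.Int.floordiv (low + high) 2).toNat (by omega) _ high rfl
          (by omega) (by omega) hhH (Or.inl hfit) hQ
      · simp only [Bool.not_eq_true] at hfit
        simp only [hfit, Bool.false_eq_true, if_false]
        exact ih (PySem.Int.floordiv (low + high) 2 - low).toNat (by omega) low _ rfl
          h0 (by omega) (by omega) hP (Or.inl hfit)
    · rw [dif_neg hc]
      have hhe : high = low + 1 := by omega
      refine ⟨hP, h0, by omega, ?_⟩
      rw [← hhe]
      exact hQ

-- ===== B-side lemmas =====

-- the char fold and count_lines' fold are the same computation with the pair swapped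
theorem foldSwap (C : Int) : ∀ (xs : List Int) (u l : Int),
    xs.foldl (charStep C) (u, l)
      = ((xs.foldl (countStep C) (l, u)).2, (xs.foldl (countStep C) (l, u)).1) := by
  intro xs
  induction xs with
  | nil => intro u l; simp
  | cons x t ihx =>
    intro u l
    simp only [List.foldl_cons, charStep, countStep]
    by_cases hc : u + x + 1 ≤ C
    · rw [if_pos hc, if_pos (show u + 1 + x ≤ C from by omega),
        show u + x + 1 = u + 1 + x from by ring]
      exact ihx (u + 1 + x) l
    · rw [if_neg hc, if_neg (show ¬ (u + 1 + x ≤ C) from by omega)]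
      exact ihx x (l + 1)

-- count_lines of a nonempty list is at least 1
theorem countFirstLB (C : Int) : ∀ (xs : List Int) (p : Int × Int), p.1 ≤ (xs.foldl (countStep C) p).1 := by
  intro xs
  induction xs with
  | nil => intro p; simp
  | cons x t ihx =>
    intro p
    simp only [List.foldl_cons, countStep]
    by_cases hc : p.2 + 1 + x ≤ C
    · rw [if_pos hc]; exact ihx _
    · rw [if_neg hc]; exact le_trans (by omega) (ihx _)

theorem countLines_pos (lens : List Int) (C : Int) : 1 ≤ countLines lens C := by
  cases lens with
  | nil => simp [countLines]
  | cons x xs => exact le_trans (by norm_num) (countFirstLB C xs (1, x))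

-- fit equals the capacity form for positive fonts that pass the width precheck
theorem fit_count (S : List String) (W H F M : Int)
    (hmax : PySem.List.max? (S.map PySem.Str.len) (fun x => x) = some M)
    (hF : 1 ≤ F) (hMW : F * M ≤ W) :
    fit S F W H = decide (countLines (S.map PySem.Str.len) (PySem.Int.floordiv W F) * F ≤ H) := by
  have hFp : (0 : Int) < F := by omega
  have hMC : M ≤ PySem.Int.floordiv W F := by
    rw [PySem.Int.le_floordiv_iff_mul_le hFp]; nlinarith
  unfold fit
  rw [hmax]
  dsimp only
  rw [if_neg (by omega : ¬ F * M > W)]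
  have hmap : S.foldl (fun (p : Int × Int) s =>
      if p.1 + (PySem.Str.len s + 1) * F ≤ W then (p.1 + (PySem.Str.len s + 1) * F, p.2)
      else (PySem.Str.len s * F, p.2 + F)) (-F, F)
      = (S.map PySem.Str.len).foldl (fun (p : Int × Int) x =>
      if p.1 + (x + 1) * F ≤ W then (p.1 + (x + 1) * F, p.2) else (x * F, p.2 + F)) (-F, F) := by
    rw [List.foldl_map]
  rw [hmap, show ((-F : Int), F) = ((-1 : Int) * F, (1 : Int) * F) from by norm_num,
    foldCorresp W F hFp]
  have key : ((S.map PySem.Str.len).foldl (charStep (PySem.Int.floordiv W F)) (-1, 1)).2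
      = countLines (S.map PySem.Str.len) (PySem.Int.floordiv W F) := by
    cases hl : S.map PySem.Str.len with
    | nil =>
      have hn : PySem.List.max? ([] : List Int) (fun x => x) = none := by
        rw [PySem.List.max?_eq_none_iff]
      rw [hl, hn] at hmax; cases hmax
    | cons x xs =>
      have hx : x ≤ M := PySem.List.max?_isMax hmax x (by rw [hl]; exact List.mem_cons_self)
      simp only [List.foldl_cons, charStep]
      rw [if_pos (show (-1 : Int) + x + 1 ≤ PySem.Int.floordiv W F from by omega),
        show (-1 : Int) + x + 1 = x from by ring, foldSwap]
      rfl
  rw [key]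

-- fonts in the same capacity block share W//F
theorem sameBlock (W F F' C : Int) (hW : 0 ≤ W) (hF : 1 ≤ F)
    (hC : PySem.Int.floordiv W F = C) (hlo : PySem.Int.floordiv W (C + 1) < F') (hhi : F' ≤ F) :
    PySem.Int.floordiv W F' = C := by
  have hFp : (0 : Int) < F := by omega
  have hC0 : 0 ≤ C := by
    rw [← hC, PySem.Int.le_floordiv_iff_mul_le hFp]; omega
  have hWC1 : 0 ≤ PySem.Int.floordiv W (C + 1) := by
    rw [PySem.Int.le_floordiv_iff_mul_le (by omega : (0:Int) < C + 1)]; omega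
  have hF'p : (0 : Int) < F' := by omega
  have hCF : C * F ≤ W := by
    rw [← PySem.Int.le_floordiv_iff_mul_le hFp, hC]
  have hlow : C ≤ PySem.Int.floordiv W F' := by
    rw [PySem.Int.le_floordiv_iff_mul_le hF'p]
    nlinarith
  have hup : PySem.Int.floordiv W F' < C + 1 := by
    rw [PySem.Int.floordiv_lt_iff_lt_mul hF'p]
    have := (PySem.Int.floordiv_lt_iff_lt_mul (by omega : (0:Int) < C + 1)).1 hlo
    nlinarith
  omega

-- one unfolded step of the block loop (zeta-reduced form of its equation)
theorem blockLoop_succ (lens : List Int) (W H : Int) (fuel : Nat) (F : Int) (hF : 1 ≤ F) :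
    blockLoop lens W H (fuel + 1) F =
      (if PySem.Int.floordiv W (PySem.Int.floordiv W F + 1)
          < min F (PySem.Int.floordiv H (countLines lens (PySem.Int.floordiv W F))) then
        min F (PySem.Int.floordiv H (countLines lens (PySem.Int.floordiv W F)))
      else blockLoop lens W H fuel (PySem.Int.floordiv W (PySem.Int.floordiv W F + 1))) := by
  rw [blockLoop, if_pos hF]

-- characterization of B's block loop
theorem blockLoop_char (S : List String) (W H M : Int)
    (hmax : PySem.List.max? (S.map PySem.Str.len) (fun x => x) = some M)
    (hW : 0 ≤ W) (hH : 1 ≤ H) :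
    ∀ (fuel : Nat) (F : Int), F.toNat ≤ fuel → F ≤ H → F * M ≤ W →
    (∀ F', F < F' → F' ≤ H → fit S F' W H = false) →
    (fit S (blockLoop (S.map PySem.Str.len) W H fuel F) W H = true ∨ blockLoop (S.map PySem.Str.len) W H fuel F = 0) ∧
    0 ≤ blockLoop (S.map PySem.Str.len) W H fuel F ∧ blockLoop (S.map PySem.Str.len) W H fuel F ≤ H ∧
    (∀ F', blockLoop (S.map PySem.Str.len) W H fuel F < F' → F' ≤ H → fit S F' W H = false) := by
  have hM0 : 0 ≤ M := by
    obtain ⟨s, _, hsm⟩ := List.mem_map.1 (PySem.List.max?_mem hmax)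
    rw [← hsm]; exact strLenNonneg s
  intro fuel
  induction fuel with
  | zero =>
    intro F hfuel hFH hFM hinv
    have h0 : blockLoop (S.map PySem.Str.len) W H 0 F = 0 := rfl
    rw [h0]
    exact ⟨Or.inr rfl, le_refl 0, by omega, fun F' h1 h2 => hinv F' (by omega) h2⟩
  | succ fuel ih =>
    intro F hfuel hFH hFM hinv
    by_cases hF : 1 ≤ F
    swap
    · have h0 : blockLoop (S.map PySem.Str.len) W H (fuel + 1) F = 0 := by
        rw [blockLoop, if_neg hF]
      rw [h0]
      exact ⟨Or.inr rfl, le_refl 0, by omega, fun F' h1 h2 => hinv F' (by omega) h2⟩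
    · rw [blockLoop_succ _ _ _ _ _ hF]
      have hFp : (0 : Int) < F := by omega
      set C := PySem.Int.floordiv W F with hCdef
      set L := countLines (S.map PySem.Str.len) C with hLdef
      set cand := min F (PySem.Int.floordiv H L) with hcanddef
      have hMC : M ≤ C := by
        rw [hCdef, PySem.Int.le_floordiv_iff_mul_le hFp]; nlinarith
      have hC0 : 0 ≤ C := le_trans hM0 hMC
      have hL1 : (1 : Int) ≤ L := countLines_pos _ _
      have hLp : (0 : Int) < L := by omega
      have hHL0 : 0 ≤ PySem.Int.floordiv H L := by
        rw [PySem.Int.le_floordiv_iff_mul_le hLp]; nlinarith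
      have hHLH : PySem.Int.floordiv H L ≤ H := by
        have h1 : PySem.Int.floordiv H L * L ≤ H :=
          (PySem.Int.le_floordiv_iff_mul_le hLp).1 (le_refl _)
        nlinarith
      have hWC1 : 0 ≤ PySem.Int.floordiv W (C + 1) := by
        rw [PySem.Int.le_floordiv_iff_mul_le (by omega : (0:Int) < C + 1)]; omega
      have hcF : cand ≤ F := min_le_left _ _
      have hcHL : cand ≤ PySem.Int.floordiv H L := min_le_right _ _
      have hc0 : 0 ≤ cand := le_min (by omega) hHL0
      have hclow : cand = F ∨ cand = PySem.Int.floordiv H L := min_choice _ _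
      -- any font of this block above the candidate is infeasible
      have hunfit : ∀ F', PySem.Int.floordiv W (C + 1) < F' → cand < F' → F' ≤ F → F' ≤ H →
          fit S F' W H = false := by
        intro F' hgt h1 h2 h3
        have hF'1 : (1 : Int) ≤ F' := by omega
        have hF'M : F' * M ≤ W := by nlinarith
        have hF'HL : PySem.Int.floordiv H L < F' := by
          rcases hclow with hm | hm <;> omega
        have hblk : PySem.Int.floordiv W F' = C := sameBlock W F F' C hW hF hCdef.symm hgt h2
        rw [fit_count S W H F' M hmax hF'1 hF'M, hblk, ← hLdef]
        simp only [decide_eq_false_iff_not]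
        intro hle
        have := (PySem.Int.floordiv_lt_iff_lt_mul hLp).1 hF'HL
        nlinarith
      by_cases hret : PySem.Int.floordiv W (C + 1) < cand
      · rw [if_pos hret]
        have hcand1 : (1 : Int) ≤ cand := by omega
        have hfitc : fit S cand W H = true := by
          rw [fit_count S W H cand M hmax hcand1 (by nlinarith),
            sameBlock W F cand C hW hF hCdef.symm hret hcF, ← hLdef]
          simp only [decide_eq_true_eq]
          have := (PySem.Int.le_floordiv_iff_mul_le hLp).1 hcHL
          nlinarith
        refine ⟨Or.inl hfitc, hc0, le_trans hcHL hHLH, ?_⟩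
        intro F' h1 h2
        by_cases hF'F : F' ≤ F
        · exact hunfit F' (by omega) h1 hF'F h2
        · exact hinv F' (by omega) h2
      · rw [if_neg hret]
        have hF2lt : PySem.Int.floordiv W (C + 1) < F := by
          rw [PySem.Int.floordiv_lt_iff_lt_mul (by omega : (0:Int) < C + 1)]
          have : PySem.Int.floordiv W F < C + 1 := by omega
          have := (PySem.Int.floordiv_lt_iff_lt_mul hFp).1 this
          nlinarith
        have hF2M : PySem.Int.floordiv W (C + 1) * M ≤ W := by
          have h1 : PySem.Int.floordiv W (C + 1) * (C + 1) ≤ W :=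
            (PySem.Int.le_floordiv_iff_mul_le (by omega : (0:Int) < C + 1)).1 (le_refl _)
          nlinarith
        refine ih (PySem.Int.floordiv W (C + 1)) (by omega) (by omega) hF2M ?_
        intro F' h1 h2
        by_cases hF'F : F' ≤ F
        · exact hunfit F' h1 (by omega) hF'F h2
        · exact hinv F' (by omega) h2

-- fit is false whenever the billboard has negative width (for a nonnegative font)
theorem fit_false_negW (S : List String) (F W H : Int) (hW : W < 0) (hF : 0 ≤ F) :
    fit S F W H = false := by
  unfold fit
  rcases hmax : PySem.List.max? (S.map PySem.Str.len) (fun x => x) with _ | M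
  · rfl
  · dsimp only
    have hM0 : 0 ≤ M := by
      obtain ⟨s, _, hsm⟩ := List.mem_map.1 (PySem.List.max?_mem hmax)
      rw [← hsm]; exact strLenNonneg s
    rw [if_pos (by nlinarith : F * M > W)]

-- ===== VERDICT (by name: the statement is the Claim_ definition above) =====
theorem solve_spec : Claim_equal_solve := by
  intro S W H _ hPre
  unfold Spec_solve solve solve_alt
  by_cases hHW : H ≤ 0 ∨ W < 0
  · rw [if_pos hHW]
    by_cases hH0 : H ≤ 0
    · rw [solveLoop, dif_neg (by omega)]
    · have hWn : W < 0 := by tauto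
      have hA := solveLoop_char S W H (H + 1 - 0).toNat 0 (H + 1) rfl (le_refl 0)
        (by omega) (le_refl _) (Or.inr rfl) (Or.inr rfl)
      obtain ⟨hPA, h0A, _, _⟩ := hA
      rcases hPA with hf | h0
      · rw [fit_false_negW S _ W H hWn h0A] at hf; cases hf
      · exact h0
  · rw [if_neg hHW]
    have hH1 : (1 : Int) ≤ H := by omega
    have hW0 : (0 : Int) ≤ W := by omega
    have hS : S ≠ [] := by
      rcases hPre with h | h
      · exact h
      · omega
    rcases hmax : PySem.List.max? (S.map PySem.Str.len) (fun x => x) with _ | M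
    · rw [PySem.List.max?_eq_none_iff] at hmax
      simp only [List.map_eq_nil_iff] at hmax
      exact absurd hmax hS
    · have hM0 : 0 ≤ M := by
        obtain ⟨s, _, hsm⟩ := List.mem_map.1 (PySem.List.max?_mem hmax)
        rw [← hsm]; exact strLenNonneg s
      simp only [hmax]
      set F0 := if 0 < M then min H (PySem.Int.floordiv W M) else H with hF0def
      have hF0H : F0 ≤ H := by
        rw [hF0def]; split_ifs
        · exact min_le_left _ _
        · exact le_refl H
      have hF0M : F0 * M ≤ W := by
        rw [hF0def]; split_ifs with hMp
        · have := (PySem.Int.le_floordiv_iff_mul_le hMp).1 (min_le_right H (PySem.Int.floordiv W M))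
          nlinarith [min_le_right H (PySem.Int.floordiv W M)]
        · have hMz : M = 0 := by omega
          simp [hMz, hW0]
      have hinv0 : ∀ F', F0 < F' → F' ≤ H → fit S F' W H = false := by
        intro F' h1 h2
        by_cases hMp : 0 < M
        · rw [hF0def, if_pos hMp] at h1
          have hgt : PySem.Int.floordiv W M < F' := by
            rcases min_choice H (PySem.Int.floordiv W M) with hm | hm <;> rw [hm] at h1 <;> omega
          have hlt : W < F' * M := (PySem.Int.floordiv_lt_iff_lt_mul hMp).1 hgt
          unfold fit
          rw [hmax]
          dsimp only
          rw [if_pos (by omega : F' * M > W)]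
        · rw [hF0def, if_neg hMp] at h1
          omega
      obtain ⟨hPB, h0B, hBH, hBall⟩ := blockLoop_char S W H M hmax hW0 hH1 F0.toNat F0
        (le_refl _) hF0H hF0M hinv0
      obtain ⟨hPA, h0A, hAH, hA1⟩ := solveLoop_char S W H (H + 1 - 0).toNat 0 (H + 1) rfl
        (le_refl 0) (by omega) (le_refl _) (Or.inr rfl) (Or.inr rfl)
      set rA := solveLoop S W H 0 (H + 1)
      set rB := blockLoop (S.map PySem.Str.len) W H F0.toNat F0
      rcases lt_trichotomy rA rB with hlt | heq | hgt
      · exfalso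
        have hfitB : fit S rB W H = true := by
          rcases hPB with h | h
          · exact h
          · omega
        rcases hA1 with hAf | hAe
        · have : fit S (rA + 1) W H = true :=
            fit_mono S W H (rA + 1) rB (by omega) (by omega) hfitB
          rw [hAf] at this; cases this
        · omega
      · exact heq
      · exfalso
        have hfitA : fit S rA W H = true := by
          rcases hPA with h | h
          · exact h
          · omega
        have := hBall rA hgt hAH
        rw [hfitA] at this; cases this
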